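-- pv_equiv track=rewrite | github.com/tlmstbs/pyth0n | лаба 6/laba6.py | generate_combinations_algorithmic
-- ===== SOURCE A (Python) =====
-- def generate_combinations_algorithmic(K):
--     result = [[]]
--     for companies in K:
--         new_result = []
--         for combination in result:
--             for company in range(companies):
--                 new_result.append(combination + [company])
--         result = new_result
--
--     filtered_result = [combo for combo in result if len(set(combo)) == len(combo)]
--     return filtered_result
-- ===== SOURCE B (Python) =====
-- def generate_combinations_algorithmic(K):
--     # DFS that prunes a partial combination as soon as it repeats an element,
--     # instead of materialising the whole Cartesian product and filtering at the end.
--     def dfs(ks, combo):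
--         if not ks:
--             return [combo]
--         out = []
--         for c in range(ks[0]):
--             if c not in combo:
--                 out.extend(dfs(ks[1:], combo + [c]))
--         return out
--     return dfs(K, [])
-- ===== Notes on version B (the rewrite author's own statement) =====
-- stated objective: faster
-- what changed: Replaces level-by-level construction of the full Cartesian product followed by a distinctness filter with a depth-first search that skips any value already present in the partial combination, so non-distinct branches are never expanded.
import Mathlib
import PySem

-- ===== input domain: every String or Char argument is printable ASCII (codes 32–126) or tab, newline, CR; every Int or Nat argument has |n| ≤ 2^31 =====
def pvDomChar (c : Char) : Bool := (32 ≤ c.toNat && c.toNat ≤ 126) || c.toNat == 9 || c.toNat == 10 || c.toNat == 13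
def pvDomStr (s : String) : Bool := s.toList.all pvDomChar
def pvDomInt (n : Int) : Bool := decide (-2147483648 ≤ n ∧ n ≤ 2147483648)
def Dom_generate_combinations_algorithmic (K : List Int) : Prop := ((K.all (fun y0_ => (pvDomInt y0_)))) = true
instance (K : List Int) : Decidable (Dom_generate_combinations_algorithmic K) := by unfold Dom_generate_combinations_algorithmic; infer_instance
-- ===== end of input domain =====

-- B prunes during the depth-first build (skips a value already in the partial
-- combination) instead of building the full Cartesian product and filtering; faster.

-- ===== PORT A =====
def generate_combinations_algorithmic (K : List Int) : List (List Int) :=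
  let result := K.foldl
    (fun result companies =>
      result.foldl
        (fun new_result combination =>
          (PySem.List.pyRange 0 companies 1).foldl
            (fun nr company => nr ++ [combination ++ [company]]) new_result)
        [])
    [[]]
  result.filter (fun combo => decide ((PySem.Set.ofList combo).length = combo.length))

-- ===== PORT B =====
-- dfs(ks, combo) of Source B: recursion on the remaining list ks
def pvDfs (ks : List Int) (combo : List Int) : List (List Int) :=
  match ks with
  | [] => [combo]
  | k :: rest =>
    (PySem.List.pyRange 0 k 1).foldl
      (fun out c => if c ∉ combo then out ++ pvDfs rest (combo ++ [c]) else out) []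

def generate_combinations_algorithmic_alt (K : List Int) : List (List Int) :=
  pvDfs K []

-- ===== PRECONDITION & SPEC =====
def Spec_generate_combinations_algorithmic (K : List Int) (out : List (List Int)) : Prop := out = generate_combinations_algorithmic_alt K
instance (K : List Int) (out : List (List Int)) : Decidable (Spec_generate_combinations_algorithmic K out) := by unfold Spec_generate_combinations_algorithmic; infer_instance

-- ===== CLAIM (what is proved, stated in full; the proofs are below) =====
def Claim_equal_generate_combinations_algorithmic : Prop := ∀ (K : List Int), Dom_generate_combinations_algorithmic K → Spec_generate_combinations_algorithmic K (generate_combinations_algorithmic K)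

-- ===== LEMMAS AND PROOFS =====

-- full product of the ranges, each tuple prefixed by `pre` (proof-only model)
def pvProd (ks : List Int) (pre : List Int) : List (List Int) :=
  match ks with
  | [] => [pre]
  | k :: rest => (PySem.List.pyRange 0 k 1).flatMap (fun c => pvProd rest (pre ++ [c]))

theorem pvChk_iff (l : List Int) :
    (decide ((PySem.Set.ofList l).length = l.length) = true) ↔ l.Nodup := by
  rw [decide_eq_true_iff]
  have hperm : (PySem.Set.ofList l).Perm l.dedup := by
    rw [List.perm_ext_iff_of_nodup (PySem.Set.nodup_ofList l) l.nodup_dedup]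
    intro a; simp [PySem.Set.mem_ofList]
  rw [hperm.length_eq]
  constructor
  · intro h
    have := (l.dedup_sublist).eq_of_length h
    rw [← this]; exact l.nodup_dedup
  · intro h; rw [h.dedup]

theorem pvFoldl_append_if_flatMap {α β : Type} (l : List α) (p : α → Prop)
    [DecidablePred p] (g : α → List β) (acc : List β) :
    l.foldl (fun out c => if p c then out ++ g c else out) acc
      = acc ++ l.flatMap (fun c => if p c then g c else []) := by
  induction l generalizing acc with
  | nil => simp
  | cons x xs ih => by_cases h : p x <;> simp [h, ih]

theorem pvProd_prefix (ks : List Int) (pre : List Int) (x : List Int)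
    (hx : x ∈ pvProd ks pre) : ∃ s, x = pre ++ s := by
  induction ks generalizing pre with
  | nil => simp [pvProd] at hx; exact ⟨[], by simp [hx]⟩
  | cons k rest ih =>
    simp [pvProd] at hx
    obtain ⟨c, _, hmem⟩ := hx
    obtain ⟨s, hs⟩ := ih (pre ++ [c]) hmem
    exact ⟨c :: s, by simp [hs]⟩

theorem pvDfs_eq_filter (ks : List Int) (pre : List Int) (h : pre.Nodup) :
    pvDfs ks pre
      = (pvProd ks pre).filter
          (fun combo => decide ((PySem.Set.ofList combo).length = combo.length)) := by
  induction ks generalizing pre with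
  | nil =>
    simp [pvDfs, pvProd, List.filter, (pvChk_iff pre).mpr h]
  | cons k rest ih =>
    rw [pvDfs, pvFoldl_append_if_flatMap]
    rw [pvProd, List.filter_flatMap]
    rw [List.nil_append]
    apply List.flatMap_congr
    intro c _
    by_cases hc : c ∉ pre
    · rw [if_pos hc, ih (pre ++ [c]) (by simp [List.nodup_append, h]; exact fun a ha heq => hc (heq ▸ ha))]
    · rw [if_neg hc]
      rw [not_not] at hc
      symm
      rw [List.filter_eq_nil_iff]
      intro x hx
      obtain ⟨s, hs⟩ := pvProd_prefix rest (pre ++ [c]) x hx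
      simp only [pvChk_iff, hs]
      intro hn
      have hpc : (pre ++ [c]).Nodup := hn.of_append_left
      simp [List.nodup_append] at hpc
      exact hpc.2 c hc rfl

theorem pvFold_eq_prod (ks : List Int) (acc : List (List Int)) :
    ks.foldl
      (fun r k => r.flatMap (fun c => (PySem.List.pyRange 0 k 1).map (fun a => c ++ [a])))
      acc
      = acc.flatMap (fun pre => pvProd ks pre) := by
  induction ks generalizing acc with
  | nil => simp [pvProd]
  | cons k rest ih =>
    rw [List.foldl_cons, ih]
    simp only [pvProd, List.flatMap_assoc, List.flatMap_map]

-- ===== VERDICT (by name: the statement is the Claim_ definition above) =====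
theorem generate_combinations_algorithmic_spec : Claim_equal_generate_combinations_algorithmic := by
  intro K _
  unfold Spec_generate_combinations_algorithmic generate_combinations_algorithmic
    generate_combinations_algorithmic_alt
  simp only [PySem.List.foldl_append_singleton_eq_map, PySem.List.foldl_append_eq_flatMap,
    List.nil_append]
  rw [pvFold_eq_prod K [[]]]
  simp only [List.flatMap_cons, List.flatMap_nil, List.append_nil]
  rw [pvDfs_eq_filter K [] List.nodup_nil]
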